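-- pv_equiv track=rewrite | github.com/Harry-Du1/Reinforcement-Learning-tool-for-RNA-folding | rl_essential/energy.py | _helices
-- ===== SOURCE A (Python) =====
-- from typing import List, Tuple, Dict
--
-- def _helices(pairing: List[int]) -> List[Tuple[int,int,int]]:
--     """Return list of helices as (i0, j0, L) with consecutive (i+k, j-k) pairs."""
--     n = len(pairing)
--     seen = set()
--     helices = []
--     i = 0
--     while i < n:
--         j = pairing[i]
--         if j > i and (i, j) not in seen:
--             L = 1
--             while i+L < j-L and pairing[i+L] == j-L:
--                 seen.add((i+L, j-L))
--                 L += 1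
--             helices.append((i, j, L))
--             i += L
--         else:
--             i += 1
--     return helices
-- ===== SOURCE B (Python) =====
-- from typing import List, Tuple
--
-- def _helices(pairing: List[int]) -> List[Tuple[int, int, int]]:
--     """Single linear scan: p starts a helix iff its partner q > p and the
--     diagonal-above pair (p-1, q+1) is absent; interior positions then fail
--     the start test by themselves (no seen set, no i += L jump)."""
--     n = len(pairing)
--     out = []
--     for p in range(n):
--         q = pairing[p]
--         if q > p and (p == 0 or pairing[p - 1] != q + 1):
--             L = 1
--             while p + L < q - L and pairing[p + L] == q - L:
--                 L += 1
--             out.append((p, q, L))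
--     return out
-- ===== Notes on version B (the rewrite author's own statement) =====
-- stated objective: simpler
-- what changed: Replaced the while-loop with i+=L jumps and the (dead) seen set by a plain for-loop over every index that emits a helix exactly when the diagonal-above pair (p-1,q+1) is absent, so interior positions disqualify themselves.
import Mathlib
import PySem

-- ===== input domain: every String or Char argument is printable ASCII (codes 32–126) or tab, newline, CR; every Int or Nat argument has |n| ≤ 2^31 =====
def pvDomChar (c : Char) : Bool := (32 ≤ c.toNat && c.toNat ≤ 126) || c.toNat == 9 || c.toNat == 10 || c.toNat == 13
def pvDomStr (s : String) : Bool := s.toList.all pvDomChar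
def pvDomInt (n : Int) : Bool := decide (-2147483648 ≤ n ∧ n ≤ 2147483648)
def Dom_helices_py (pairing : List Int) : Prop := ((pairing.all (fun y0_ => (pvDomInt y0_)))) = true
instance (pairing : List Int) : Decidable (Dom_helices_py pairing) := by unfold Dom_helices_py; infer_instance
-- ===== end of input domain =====

-- B replaces A's jump-by-L while loop and (dead) seen set with one plain for-loop
-- emitting a helix exactly at positions whose diagonal-above pair is absent (objective: simpler).

-- shared indexing helper: pairing[k] (all accesses are in range under Pre_; equals
-- PySem.List.pyGetD pairing (k : Int) 0 by pyGetD_natCast, exact on the admitted domain)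
def pvPg (pairing : List Int) (k : Nat) : Int := pairing.getD k 0

-- ===== PORT A =====
-- inner 'while i+L < j-L and pairing[i+L] == j-L' of A, threading the seen set.
-- fuel is a totality guard only: called with fuel = (j-i).toNat, which the loop
-- condition 2L < j-i can never exhaust (extB_fuel_spec below proves the exit fact).
def helicesExtA (pairing : List Int) (i : Nat) (j : Int) :
    Nat → Nat → PySem.Set (Int × Int) → Nat × PySem.Set (Int × Int)
  | 0, L, seen => (L, seen)
  | fuel + 1, L, seen =>
    if (i : Int) + L < j - L ∧ pvPg pairing (i + L) = j - L then
      helicesExtA pairing i j fuel (L + 1) (PySem.Set.add seen ((i : Int) + L, j - L))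
    else (L, seen)

-- outer 'while i < n' of A; fuel = n - i bounds the remaining iterations (i grows each turn)
def helicesLoopA (pairing : List Int) :
    Nat → Nat → PySem.Set (Int × Int) → List (Int × Int × Int) → List (Int × Int × Int)
  | 0, _, _, acc => acc
  | fuel + 1, i, seen, acc =>
    if i < pairing.length then
      let j := pvPg pairing i
      if j > (i : Int) ∧ ((i : Int), j) ∉ seen then
        helicesLoopA pairing fuel
          (i + (helicesExtA pairing i j (j - (i : Int)).toNat 1 seen).1)
          (helicesExtA pairing i j (j - (i : Int)).toNat 1 seen).2
          (acc ++ [((i : Int), j, ((helicesExtA pairing i j (j - (i : Int)).toNat 1 seen).1 : Int))])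
      else
        helicesLoopA pairing fuel (i + 1) seen acc
    else acc

def helices_py (pairing : List Int) : List (Int × Int × Int) :=
  helicesLoopA pairing pairing.length 0 PySem.Set.empty []

-- ===== PORT B =====
-- inner 'while p+L < q-L and pairing[p+L] == q-L' of B (no seen set; same fuel guard)
def helicesExtB (pairing : List Int) (p : Nat) (q : Int) : Nat → Nat → Nat
  | 0, L => L
  | fuel + 1, L =>
    if (p : Int) + L < q - L ∧ pvPg pairing (p + L) = q - L then
      helicesExtB pairing p q fuel (L + 1)
    else L

def helicesStep (pairing : List Int) (acc : List (Int × Int × Int)) (p : Nat) :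
    List (Int × Int × Int) :=
  let q := pvPg pairing p
  acc ++ (if (p : Int) < q ∧ (p = 0 ∨ pvPg pairing (p - 1) ≠ q + 1) then
            [((p : Int), q, (helicesExtB pairing p q (q - (p : Int)).toNat 1 : Int))]
          else [])

def helices_py_alt (pairing : List Int) : List (Int × Int × Int) :=
  (List.range pairing.length).foldl (helicesStep pairing) []

-- ===== PRECONDITION & SPEC =====
-- Pre_ excludes exactly the inputs on which A raises IndexError: the extension loop
-- tests pairing[n] iff the last entry satisfies pairing[n-1] ≥ n+2 (first out-of-range
-- index reached is always n); B raises there too.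
def Pre_helices_py (pairing : List Int) : Prop :=
  pairing = [] ∨ pvPg pairing (pairing.length - 1) ≤ (pairing.length : Int) + 1
instance (pairing : List Int) : Decidable (Pre_helices_py pairing) := by
  unfold Pre_helices_py; infer_instance

def pvWitness_helices_py : List Int := [3, 2, -1, 0]

def Spec_helices_py (pairing : List Int) (out : List (Int × Int × Int)) : Prop :=
  out = helices_py_alt pairing
instance (pairing : List Int) (out : List (Int × Int × Int)) : Decidable (Spec_helices_py pairing out) := by
  unfold Spec_helices_py; infer_instance

-- ===== CLAIM (what is proved, stated in full; the proofs are below) =====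
def Claim_equal_helices_py : Prop :=
  ∀ (pairing : List Int), Dom_helices_py pairing → Pre_helices_py pairing →
    Spec_helices_py pairing (helices_py pairing)

-- ===== LEMMAS AND PROOFS =====

-- A's extension computes the same length as B's (the seen set does not steer it)
theorem extA_fst (pairing : List Int) (i : Nat) (j : Int) :
    ∀ (fuel L : Nat) (seen : PySem.Set (Int × Int)),
      (helicesExtA pairing i j fuel L seen).1 = helicesExtB pairing i j fuel L := by
  intro fuel
  induction fuel with
  | zero => intro L seen; rfl
  | succ f ih =>
    intro L seen
    simp only [helicesExtA, helicesExtB]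
    split_ifs with h
    · exact ih (L + 1) _
    · rfl

-- every pair A's extension adds to seen has index component < i + final L
theorem extA_seen (pairing : List Int) (i : Nat) (j : Int) :
    ∀ (fuel L : Nat) (seen : PySem.Set (Int × Int)),
      (∀ x ∈ seen, x.1 < (i : Int) + L) →
      ∀ x ∈ (helicesExtA pairing i j fuel L seen).2,
        x.1 < (i : Int) + (helicesExtA pairing i j fuel L seen).1 := by
  intro fuel
  induction fuel with
  | zero => intro L seen hs; exact hs
  | succ f ih =>
    intro L seen hs
    simp only [helicesExtA]
    split_ifs with h
    · apply ih
      intro x hx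
      rcases (PySem.Set.mem_add _ _ _).1 hx with h1 | h1
      · have := hs x h1; push_cast at this ⊢; omega
      · subst h1; push_cast; omega
    · exact hs

-- characterisation of B's extension under sufficient fuel:
-- result ≥ L, every passed step matched, and the loop's exit condition fails at the result
theorem extB_fuel_spec (pairing : List Int) (p : Nat) (q : Int) :
    ∀ (fuel L : Nat), q - (p : Int) < 2 * L + fuel →
      L ≤ helicesExtB pairing p q fuel L ∧
      (∀ k, L ≤ k → k < helicesExtB pairing p q fuel L →
          pvPg pairing (p + k) = q - k ∧ (p : Int) + k < q - k) ∧
      ¬ ((p : Int) + helicesExtB pairing p q fuel L < q - helicesExtB pairing p q fuel L ∧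
          pvPg pairing (p + helicesExtB pairing p q fuel L) = q - helicesExtB pairing p q fuel L) := by
  intro fuel
  induction fuel with
  | zero =>
    intro L hf
    simp only [helicesExtB]
    exact ⟨le_refl _, by omega, by rintro ⟨h1, _⟩; omega⟩
  | succ f ih =>
    intro L hf
    simp only [helicesExtB]
    split_ifs with h
    · obtain ⟨ih1, ih2, ih3⟩ := ih (L + 1) (by omega)
      refine ⟨by omega, ?_, ih3⟩
      intro k hk1 hk2
      rcases Nat.eq_or_lt_of_le hk1 with rfl | hk
      · exact ⟨h.2, h.1⟩
      · exact ih2 k hk hk2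
    · exact ⟨le_refl _, by omega, h⟩

-- the start-invariant carried from position to position
def InvI (pairing : List Int) (i : Nat) : Prop :=
  (i : Int) < pvPg pairing i → (i = 0 ∨ pvPg pairing (i - 1) ≠ pvPg pairing i + 1)

theorem flatMap_range'_nil {f : Nat → List (Int × Int × Int)} (a len : Nat)
    (h : ∀ k, a ≤ k → k < a + len → f k = []) :
    (List.range' a len).flatMap f = [] := by
  induction len generalizing a with
  | zero => simp
  | succ m ih =>
    rw [List.range'_succ]
    simp only [List.flatMap_cons]
    rw [h a (le_refl _) (by omega), ih (a + 1) (fun k hk1 hk2 => h k (by omega) (by omega))]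
    simp

theorem foldl_step_append (pairing : List Int) (l : List Nat) :
    ∀ acc, l.foldl (helicesStep pairing) acc = acc ++ l.flatMap
      (fun p => (helicesStep pairing [] p)) := by
  induction l with
  | nil => simp
  | cons x xs ih =>
    intro acc
    simp only [List.foldl_cons, List.flatMap_cons, ih]
    simp [helicesStep]

-- main segment lemma: from any admissible state, A's loop produces acc ++ B's scan of [i, n)
theorem loop_seg (pairing : List Int) (hpre : Pre_helices_py pairing) :
    ∀ (fuel i : Nat), pairing.length - i ≤ fuel →
      ∀ (seen : PySem.Set (Int × Int)) (acc : List (Int × Int × Int)),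
        (∀ x ∈ seen, x.1 < (i : Int)) → InvI pairing i →
        helicesLoopA pairing fuel i seen acc =
          acc ++ (List.range' i (pairing.length - i)).flatMap (fun p => helicesStep pairing [] p) := by
  intro fuel
  induction fuel with
  | zero =>
    intro i hfi seen acc hseen hinv
    have : pairing.length - i = 0 := by omega
    simp [helicesLoopA, this]
  | succ m ih =>
    intro i hfi seen acc hseen hinv
    by_cases hin : i < pairing.length
    · simp only [helicesLoopA]
      rw [if_pos hin]
      set j := pvPg pairing i with hj
      by_cases hji : j > (i : Int)
      · -- helix start in A
        have hnotseen : ((i : Int), j) ∉ seen := by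
          intro hmem
          exact absurd (hseen _ hmem) (by simp)
        rw [if_pos ⟨hji, hnotseen⟩]
        set E := helicesExtB pairing i j (j - (i : Int)).toNat 1 with hE
        have hr1 : (helicesExtA pairing i j (j - (i : Int)).toNat 1 seen).1 = E :=
          extA_fst pairing i j _ 1 seen
        obtain ⟨hge, hsteps, hstop⟩ := extB_fuel_spec pairing i j (j - (i : Int)).toNat 1 (by omega)
        rw [← hE] at hge hsteps hstop
        -- i + E ≤ n: otherwise the chain would put pairing[n-1] ≥ n+2, which Pre_ forbids
        have hlastle : pvPg pairing (pairing.length - 1) ≤ (pairing.length : Int) + 1 := by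
          rcases hpre with h0 | h0
          · exact absurd hin (by simp [h0])
          · exact h0
        have hiEn : i + E ≤ pairing.length := by
          by_contra hcon
          push Not at hcon
          have hk1 : (pairing.length - 1 - i) + 1 < E := by omega
          have hb := (hsteps ((pairing.length - 1 - i) + 1) (by omega) hk1).2
          have hv : pvPg pairing (pairing.length - 1) = j - ((pairing.length : Int) - 1 - i) := by
            rcases Nat.eq_zero_or_pos (pairing.length - 1 - i) with h1 | h1
            · have hieq : pairing.length - 1 = i := by omega
              rw [hieq, ← hj]
              omega
            · have := (hsteps (pairing.length - 1 - i) (by omega) (by omega)).1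
              have hieq : i + (pairing.length - 1 - i) = pairing.length - 1 := by omega
              rw [hieq] at this
              rw [this]
              omega
          omega
        -- last matched value: pvPg (i+E-1) = j - (E-1)
        have hlast : pvPg pairing (i + E - 1) = j - ((E : Int) - 1) := by
          rcases Nat.eq_or_lt_of_le hge with h1 | h1
          · have : i + E - 1 = i := by omega
            rw [this, ← hj]; omega
          · have h2 := (hsteps (E - 1) (by omega) (by omega)).1
            have h3 : i + (E - 1) = i + E - 1 := by omega
            rw [h3] at h2; rw [h2]; push_cast [Nat.cast_sub (by omega : 1 ≤ E)]; ring_nf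
        -- new seen invariant at i + E
        have hseen' : ∀ x ∈ (helicesExtA pairing i j (j - (i : Int)).toNat 1 seen).2,
            x.1 < ((i + E : Nat) : Int) := by
          intro x hx
          have := extA_seen pairing i j (j - (i : Int)).toNat 1 seen
            (fun x hx => by have := hseen x hx; push_cast; omega) x hx
          rw [hr1] at this; push_cast at this ⊢; omega
        -- InvI at i + E
        have hinv' : InvI pairing (i + E) := by
          intro hlt
          right
          intro heq
          rw [heq] at hlast
          have h2 : pvPg pairing (i + E) = j - E := by omega
          exact hstop ⟨by rw [← h2]; push_cast at hlt ⊢; omega, h2⟩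
        have hrec := ih (i + E) (by omega) (helicesExtA pairing i j (j - (i : Int)).toNat 1 seen).2
          (acc ++ [((i : Int), j, (E : Int))]) hseen' hinv'
        rw [hr1, hrec]
        -- split range' i (n - i) into i :: interior ++ rest
        have hsplit : List.range' i (pairing.length - i) =
            List.range' i E ++ List.range' (i + E) (pairing.length - (i + E)) := by
          have h := @List.range'_append i E (pairing.length - (i + E)) 1
          rw [one_mul] at h
          rw [show pairing.length - i = E + (pairing.length - (i + E)) from by omega]
          exact h.symm
        rw [hsplit, List.flatMap_append]
        have hErange : List.range' i E = i :: List.range' (i + 1) (E - 1) := by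
          conv_lhs => rw [show E = (E - 1) + 1 from by omega]
          rw [List.range'_succ]
        rw [hErange]
        simp only [List.flatMap_cons]
        -- the head i emits [(i, j, E)]
        have hstart : helicesStep pairing [] i = [((i : Int), j, (E : Int))] := by
          have hc2 : i = 0 ∨ pvPg pairing (i - 1) ≠ j + 1 := by
            have h0 := hinv
            unfold InvI at h0
            rw [← hj] at h0
            exact h0 hji
          simp only [helicesStep, ← hj]
          rw [if_pos ⟨hji, hc2⟩, ← hE]
          simp
        -- interior positions emit []
        have hinterior : (List.range' (i + 1) (E - 1)).flatMap (fun p => helicesStep pairing [] p) = [] := by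
          apply flatMap_range'_nil
          intro k hk1 hk2
          have hkE : k - i < E := by omega
          have hki : 1 ≤ k - i := by omega
          obtain ⟨hm1, _⟩ := hsteps (k - i) hki hkE
          have hkk : i + (k - i) = k := by omega
          rw [hkk] at hm1
          have hm1' : pvPg pairing k = j - ((k : Int) - i) := by
            rw [hm1]; push_cast [Nat.cast_sub (by omega : i ≤ k)]; omega
          have hprev : pvPg pairing (k - 1) = j - ((k : Int) - i - 1) := by
            rcases Nat.eq_or_lt_of_le hki with h1 | h1
            · have : k - 1 = i := by omega
              rw [this, ← hj]
              omega
            · obtain ⟨hp1, _⟩ := hsteps (k - i - 1) (by omega) (by omega)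
              have : i + (k - i - 1) = k - 1 := by omega
              rw [this] at hp1; rw [hp1]
              omega
          have hnot : ¬ ((k : Int) < pvPg pairing k ∧
              (k = 0 ∨ pvPg pairing (k - 1) ≠ pvPg pairing k + 1)) := by
            rintro ⟨hc1, hc2⟩
            rcases hc2 with hc2 | hc2
            · omega
            · exact hc2 (by rw [hprev, hm1']; ring)
          simp only [helicesStep]
          rw [if_neg hnot]
          simp
        rw [hstart, hinterior]
        simp
      · -- not a start: j ≤ i
        rw [if_neg (by intro hc; exact hji hc.1)]
        have hinv' : InvI pairing (i + 1) := by
          intro hlt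
          right
          have : i + 1 - 1 = i := by omega
          rw [this, ← hj]
          push_cast at hlt
          omega
        have hseen' : ∀ x ∈ seen, x.1 < ((i + 1 : Nat) : Int) := by
          intro x hx; have := hseen x hx; push_cast; omega
        rw [ih (i + 1) (by omega) seen acc hseen' hinv']
        have hsplit : List.range' i (pairing.length - i) =
            i :: List.range' (i + 1) (pairing.length - (i + 1)) := by
          have h1 : pairing.length - i = (pairing.length - (i + 1)) + 1 := by omega
          rw [h1, List.range'_succ]
        rw [hsplit]
        simp only [List.flatMap_cons]
        have hskip : helicesStep pairing [] i = [] := by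
          simp only [helicesStep, ← hj]
          rw [if_neg (fun hc => hji hc.1)]
          simp
        rw [hskip]
        simp
    · simp only [helicesLoopA]
      rw [if_neg hin]
      have : pairing.length - i = 0 := by omega
      simp [this]

-- ===== VERDICT (by name: the statement is the Claim_ definition above) =====
theorem helices_py_spec : Claim_equal_helices_py := by
  intro pairing _ hpre
  unfold Spec_helices_py helices_py helices_py_alt
  rw [loop_seg pairing hpre pairing.length 0 (by omega) PySem.Set.empty []
      (by intro x hx; simp [PySem.Set.empty] at hx) (by intro _; left; rfl)]
  rw [foldl_step_append]
  simp [List.range_eq_range']
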